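-- pv_equiv track=rewrite | github.com/mgasvoda/KitchenSage | backend/src/tools/grocery_tools.py | _generate_shopping_route
-- ===== SOURCE A (Python) =====
-- from typing import Dict, List, Any, Optional
--
-- def _generate_shopping_route(organized_list: Dict[str, List[Dict[str, Any]]]) -> List[str]:
--     """Generate efficient shopping route through store sections."""
--
--     # Typical store layout order for efficient shopping
--     typical_store_order = [
--         'Produce',
--         'Dairy & Eggs',
--         'Meat & Seafood',
--         'Pantry & Dry Goods',
--         'Beverages',
--         'Frozen Foods',
--         'Miscellaneous'
--     ]
--
--     route = []
--     for section in typical_store_order: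
--         if section in organized_list and organized_list[section]:
--             route.append(section)
--
--     # Add any remaining sections not in the typical order
--     for section in organized_list:
--         if section not in route and organized_list[section]:
--             route.append(section)
--
--     return route
-- ===== SOURCE B (Python) =====
-- from typing import Dict, List, Any
--
--
-- def _generate_shopping_route(organized_list: Dict[str, List[Dict[str, Any]]]) -> List[str]:
--     """Generate efficient shopping route through store sections."""
--
--     typical_store_order = [
--         'Produce',
--         'Dairy & Eggs',
--         'Meat & Seafood',
--         'Pantry & Dry Goods',
--         'Beverages',
--         'Frozen Foods',
--         'Miscellaneous'
--     ]
--
--     order = {name: i for i, name in enumerate(typical_store_order)}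
--     present = [section for section in organized_list if organized_list[section]]
--     # Stable sort: typical sections take their layout rank, every other section
--     # gets the same sentinel rank and therefore keeps its dict order at the end.
--     return sorted(present, key=lambda s: order.get(s, len(typical_store_order)))
-- ===== Notes on version B (the rewrite author's own statement) =====
-- stated objective: faster
-- what changed: Replaces A's two sequential scans (typical-order scan, then a dict scan with a linear 'not in route' check) by building a rank table once, filtering the non-empty sections, and doing one stable sort keyed by rank with a shared sentinel rank for non-typical sections.
import Mathlib
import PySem

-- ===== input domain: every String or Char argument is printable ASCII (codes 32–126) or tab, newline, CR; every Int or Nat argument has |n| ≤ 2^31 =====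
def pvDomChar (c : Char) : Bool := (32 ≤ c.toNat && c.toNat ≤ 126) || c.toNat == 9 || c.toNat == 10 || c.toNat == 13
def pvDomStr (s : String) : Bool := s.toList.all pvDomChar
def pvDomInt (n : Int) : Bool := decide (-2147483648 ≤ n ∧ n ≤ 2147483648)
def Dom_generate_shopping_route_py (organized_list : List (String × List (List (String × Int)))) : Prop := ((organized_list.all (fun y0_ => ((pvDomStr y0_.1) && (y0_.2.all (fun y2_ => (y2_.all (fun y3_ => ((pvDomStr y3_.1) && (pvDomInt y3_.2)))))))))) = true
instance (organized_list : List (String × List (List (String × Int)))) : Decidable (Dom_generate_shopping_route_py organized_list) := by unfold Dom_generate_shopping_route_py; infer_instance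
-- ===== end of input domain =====

set_option maxRecDepth 8000


-- B orders the sections by one stable sort over a rank table instead of A's two
-- sequential scans with a linear 'not in route' check (measured faster at large sizes).

-- ===== PORT A =====
def pvTypicalStoreOrder : List String :=
  ["Produce", "Dairy & Eggs", "Meat & Seafood", "Pantry & Dry Goods", "Beverages",
   "Frozen Foods", "Miscellaneous"]

def generate_shopping_route_py (organized_list : List (String × List (List (String × Int)))) : List String :=
  let d := PySem.Dict.mk organized_list
  let route := pvTypicalStoreOrder.foldl
    (fun route sec => if d.contains sec && decide (d.getD sec [] ≠ []) then route ++ [sec] else route) []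
  d.keys.foldl
    (fun route sec => if !route.contains sec && decide (d.getD sec [] ≠ []) then route ++ [sec] else route) route

-- ===== PORT B =====
def generate_shopping_route_py_alt (organized_list : List (String × List (List (String × Int)))) : List String :=
  let d := PySem.Dict.mk organized_list
  let order : PySem.Dict String Int :=
    (PySem.List.enumerate pvTypicalStoreOrder).foldl (fun acc iv => acc.insert iv.2 iv.1) PySem.Dict.empty
  let present := d.keys.filter (fun sec => decide (d.getD sec [] ≠ []))
  PySem.List.sorted present (fun s => order.getD s (Int.ofNat pvTypicalStoreOrder.length)) false

-- ===== PRECONDITION & SPEC =====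
-- Pre_ excludes association lists with duplicate keys: they do not encode a Python dict
-- unambiguously (dict construction collapses duplicates), so the ports' treatment of
-- repeated keys is an artefact of the encoding, not of either program.
def Pre_generate_shopping_route_py (organized_list : List (String × List (List (String × Int)))) : Prop :=
  (organized_list.map Prod.fst).Nodup
instance (organized_list : List (String × List (List (String × Int)))) : Decidable (Pre_generate_shopping_route_py organized_list) := by unfold Pre_generate_shopping_route_py; infer_instance

def pvWitness_generate_shopping_route_py : (List (String × List (List (String × Int)))) :=
  [("Zoo", [[("milk", 2)]]), ("Produce", [[("apple", 1)]]), ("Dairy & Eggs", [])]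

def Spec_generate_shopping_route_py (organized_list : List (String × List (List (String × Int)))) (out : List String) : Prop := out = generate_shopping_route_py_alt organized_list
instance (organized_list : List (String × List (List (String × Int)))) (out : List String) : Decidable (Spec_generate_shopping_route_py organized_list out) := by unfold Spec_generate_shopping_route_py; infer_instance

-- ===== CLAIM (what is proved, stated in full; the proofs are below) =====
def Claim_equal_generate_shopping_route_py : Prop := ∀ (organized_list : List (String × List (List (String × Int)))), Dom_generate_shopping_route_py organized_list → Pre_generate_shopping_route_py organized_list → Spec_generate_shopping_route_py organized_list (generate_shopping_route_py organized_list)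

-- ===== LEMMAS AND PROOFS =====

-- rank of a section in the typical store layout (7 = not a typical section)
def pvRank (s : String) : Int :=
  if s = "Produce" then 0 else if s = "Dairy & Eggs" then 1 else if s = "Meat & Seafood" then 2
  else if s = "Pantry & Dry Goods" then 3 else if s = "Beverages" then 4
  else if s = "Frozen Foods" then 5 else if s = "Miscellaneous" then 6 else 7

def pvT (xs : List String) : List String := pvTypicalStoreOrder.filter (fun t => decide (t ∈ xs))
def pvE (xs : List String) : List String := xs.filter (fun s => decide (s ∉ pvTypicalStoreOrder))

theorem pvRank_le_seven (a : String) : pvRank a ≤ 7 := by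
  unfold pvRank; split_ifs <;> norm_num

theorem pvRank_of_not_mem {a : String} (h : a ∉ pvTypicalStoreOrder) : pvRank a = 7 := by
  simp [pvTypicalStoreOrder] at h
  obtain ⟨h1, h2, h3, h4, h5, h6, h7⟩ := h
  simp [pvRank, h1, h2, h3, h4, h5, h6, h7]

-- the rank table B builds evaluates to pvRank
theorem pvKey_eq (s : String) :
    (((PySem.List.enumerate pvTypicalStoreOrder).foldl (fun acc iv => acc.insert iv.2 iv.1)
      (PySem.Dict.empty : PySem.Dict String Int)).getD s (Int.ofNat pvTypicalStoreOrder.length))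
      = pvRank s := by
  have h : ((PySem.List.enumerate pvTypicalStoreOrder).foldl (fun acc iv => acc.insert iv.2 iv.1)
      (PySem.Dict.empty : PySem.Dict String Int))
      = PySem.Dict.mk [("Produce", 0), ("Dairy & Eggs", 1), ("Meat & Seafood", 2),
          ("Pantry & Dry Goods", 3), ("Beverages", 4), ("Frozen Foods", 5), ("Miscellaneous", 6)] := by
    rfl
  have hlen : Int.ofNat pvTypicalStoreOrder.length = 7 := rfl
  rw [h, hlen]
  unfold pvRank
  split_ifs with h1 h2 h3 h4 h5 h6 h7
  · subst h1; rfl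
  · subst h2; rfl
  · subst h3; rfl
  · subst h4; rfl
  · subst h5; rfl
  · subst h6; rfl
  · subst h7; rfl
  · simp [PySem.Dict.getD, beq_iff_eq, Ne.symm h1, Ne.symm h2, Ne.symm h3, Ne.symm h4,
      Ne.symm h5, Ne.symm h6, Ne.symm h7, PySem.Dict.get?]

-- insertBy passes over a prefix it does not go before
theorem pvInsertBy_append (blt : String → String → Bool) (x : String) :
    ∀ (A B : List String), (∀ a ∈ A, blt x a = false) →
      PySem.List.insertBy blt x (A ++ B) = A ++ PySem.List.insertBy blt x B := by
  intro A
  induction A with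
  | nil => intro B _; simp
  | cons a t ih =>
    intro B h
    have ha : blt x a = false := h a (by simp)
    simp only [List.cons_append, PySem.List.insertBy, ha]
    simp [ih B (fun b hb => h b (by simp [hb]))]

theorem pvInsertBy_front (blt : String → String → Bool) (x : String) (B : List String)
    (h : ∀ y ∈ B, ∀ t, B = y :: t → blt x y = true) :
    PySem.List.insertBy blt x B = x :: B := by
  cases B with
  | nil => simp [PySem.List.insertBy]
  | cons y t => simp [PySem.List.insertBy, h y (by simp) t rfl]

-- one insertion step of B's sort preserves the bucketed shape
theorem pvStep (x : String) (P S : List String)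
    (hsplit : pvTypicalStoreOrder = P ++ x :: S)
    (hP : ∀ a ∈ P, pvRank a < pvRank x) (hS : ∀ a ∈ S, pvRank x < pvRank a)
    (hx7 : pvRank x < 7) (xs : List String) (hx : x ∉ xs) :
    PySem.List.insertBy (fun a b => decide (pvRank a < pvRank b)) x (pvT xs ++ pvE xs)
      = pvT (xs ++ [x]) ++ pvE (xs ++ [x]) := by
  have hxm : x ∈ pvTypicalStoreOrder := by rw [hsplit]; simp
  have hPne : ∀ a ∈ P, a ≠ x := fun a ha heq => absurd (hP a ha) (by simp [heq])
  have hSne : ∀ a ∈ S, a ≠ x := fun a ha heq => absurd (hS a ha) (by simp [heq])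
  have hT : pvT xs = P.filter (fun t => decide (t ∈ xs)) ++ S.filter (fun t => decide (t ∈ xs)) := by
    simp [pvT, hsplit, List.filter_append, hx]
  have hfP : P.filter (fun t => decide (t ∈ xs ++ [x])) = P.filter (fun t => decide (t ∈ xs)) :=
    List.filter_congr (fun a ha => by simp [List.mem_append, hPne a ha])
  have hfS : S.filter (fun t => decide (t ∈ xs ++ [x])) = S.filter (fun t => decide (t ∈ xs)) :=
    List.filter_congr (fun a ha => by simp [List.mem_append, hSne a ha])
  have hT' : pvT (xs ++ [x])
      = P.filter (fun t => decide (t ∈ xs)) ++ x :: S.filter (fun t => decide (t ∈ xs)) := by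
    unfold pvT
    rw [hsplit, List.filter_append, List.filter_cons, hfP, hfS]
    simp
  have hE' : pvE (xs ++ [x]) = pvE xs := by
    simp [pvE, List.filter_append, hxm]
  rw [hT, hT', hE', List.append_assoc]
  rw [pvInsertBy_append _ _ _ _ (fun a ha => by
    simp only [List.mem_filter] at ha
    simp [not_lt.mpr (le_of_lt (hP a ha.1))])]
  rw [pvInsertBy_front _ _ _ (fun y hy t ht => by
    rcases List.mem_append.mp hy with h1 | h2
    · simp only [List.mem_filter] at h1
      simp [hS y h1.1]
    · simp only [pvE, List.mem_filter, decide_eq_true_eq] at h2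
      have : pvRank y = 7 := pvRank_of_not_mem h2.2
      simp [this, hx7])]
  simp

-- B's stable sort produces the bucketed list: typical sections first (in layout
-- order), then the rest in original order
theorem pvSortBucket : ∀ (xs : List String), xs.Nodup →
    PySem.List.sorted xs pvRank false = pvT xs ++ pvE xs := by
  intro xs
  induction xs using List.reverseRecOn with
  | nil => simp [PySem.List.sorted, pvT, pvE]
  | append_singleton xs x ih =>
    intro hnd
    have hxs : xs.Nodup := (List.nodup_append.mp hnd).1
    have hx : x ∉ xs := fun hmem =>
      ((List.nodup_append.mp hnd).2.2 x hmem x (by simp)) rfl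
    have hfold : PySem.List.sorted (xs ++ [x]) pvRank false
        = PySem.List.insertBy (fun a b => decide (pvRank a < pvRank b)) x
            (PySem.List.sorted xs pvRank false) := by
      rw [PySem.List.sorted_eq_foldl_insertBy, List.foldl_append,
          ← PySem.List.sorted_eq_foldl_insertBy]
      simp
    rw [hfold, ih hxs]
    by_cases hmem : x ∈ pvTypicalStoreOrder
    · simp only [pvTypicalStoreOrder, List.mem_cons, List.not_mem_nil, or_false] at hmem
      rcases hmem with rfl | rfl | rfl | rfl | rfl | rfl | rfl
      · exact pvStep _ [] ["Dairy & Eggs", "Meat & Seafood", "Pantry & Dry Goods", "Beverages", "Frozen Foods", "Miscellaneous"] rfl (by decide) (by decide) (by decide) xs hx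
      · exact pvStep _ ["Produce"] ["Meat & Seafood", "Pantry & Dry Goods", "Beverages", "Frozen Foods", "Miscellaneous"] rfl (by decide) (by decide) (by decide) xs hx
      · exact pvStep _ ["Produce", "Dairy & Eggs"] ["Pantry & Dry Goods", "Beverages", "Frozen Foods", "Miscellaneous"] rfl (by decide) (by decide) (by decide) xs hx
      · exact pvStep _ ["Produce", "Dairy & Eggs", "Meat & Seafood"] ["Beverages", "Frozen Foods", "Miscellaneous"] rfl (by decide) (by decide) (by decide) xs hx
      · exact pvStep _ ["Produce", "Dairy & Eggs", "Meat & Seafood", "Pantry & Dry Goods"] ["Frozen Foods", "Miscellaneous"] rfl (by decide) (by decide) (by decide) xs hx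
      · exact pvStep _ ["Produce", "Dairy & Eggs", "Meat & Seafood", "Pantry & Dry Goods", "Beverages"] ["Miscellaneous"] rfl (by decide) (by decide) (by decide) xs hx
      · exact pvStep _ ["Produce", "Dairy & Eggs", "Meat & Seafood", "Pantry & Dry Goods", "Beverages", "Frozen Foods"] [] rfl (by decide) (by decide) (by decide) xs hx
    · have h7 : pvRank x = 7 := pvRank_of_not_mem hmem
      rw [PySem.List.insertBy_of_forall_not_before _ _ _ (fun y _ => by
        simp [h7, not_lt.mpr (pvRank_le_seven y)])]
      have hT' : pvT (xs ++ [x]) = pvT xs := by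
        refine List.filter_congr (fun t ht => ?_)
        have : t ≠ x := fun heq => hmem (heq ▸ ht)
        simp [List.mem_append, this]
      have hE' : pvE (xs ++ [x]) = pvE xs ++ [x] := by
        simp [pvE, List.filter_append, hmem]
      rw [hT', hE', List.append_assoc]

-- A's second loop appends exactly the not-yet-routed non-empty sections, in order
theorem pvLoop2 (p : String → Bool) : ∀ (keys r : List String), keys.Nodup →
    keys.foldl (fun r s => if !r.contains s && p s then r ++ [s] else r) r
      = r ++ keys.filter (fun s => !r.contains s && p s) := by
  intro keys
  induction keys with
  | nil => intro r _; simp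
  | cons a t ih =>
    intro r hnd
    have ha : a ∉ t := (List.nodup_cons.mp hnd).1
    have ht : t.Nodup := (List.nodup_cons.mp hnd).2
    by_cases h : (!r.contains a && p a) = true
    · have hf : t.filter (fun s => !(r ++ [a]).contains s && p s)
          = t.filter (fun s => !r.contains s && p s) :=
        List.filter_congr (fun s hs => by
          have hne : s ≠ a := fun heq => ha (heq ▸ hs)
          simp [hne])
      rw [List.foldl_cons, if_pos h, List.filter_cons, if_pos h, ih (r ++ [a]) ht, hf]
      simp
    · rw [List.foldl_cons, if_neg h, List.filter_cons, if_neg h, ih r ht]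

theorem pvContains_and (d : PySem.Dict String (List (List (String × Int)))) (s : String) :
    (d.contains s && decide (d.getD s [] ≠ [])) = decide (d.getD s [] ≠ []) := by
  rw [PySem.Dict.contains_eq_isSome_get?]
  cases h : d.get? s <;> simp [PySem.Dict.getD, h]

theorem pvNonempty_mem_keys (d : PySem.Dict String (List (List (String × Int)))) (s : String)
    (h : d.getD s [] ≠ []) : s ∈ d.keys := by
  by_contra hk
  have := (PySem.Dict.get?_eq_none_iff_not_mem_keys d s).mpr hk
  simp [PySem.Dict.getD, this] at h

-- ===== VERDICT (by name: the statement is the Claim_ definition above) =====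
theorem generate_shopping_route_py_spec : Claim_equal_generate_shopping_route_py := by
  intro ol _ hpre
  unfold Spec_generate_shopping_route_py generate_shopping_route_py generate_shopping_route_py_alt
  simp only []
  set d := PySem.Dict.mk ol with hd
  have hkeys : d.keys = ol.map Prod.fst := by simp [hd, PySem.Dict.keys]
  have hknd : d.keys.Nodup := by rw [hkeys]; exact hpre
  set p : String → Bool := fun s => decide (d.getD s [] ≠ []) with hp
  set present := d.keys.filter p with hpres
  have hpnd : present.Nodup := hknd.filter p
  -- first loop of A = typical sections filtered by p
  have h1 : pvTypicalStoreOrder.foldl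
      (fun route sec => if d.contains sec && decide (d.getD sec [] ≠ []) then route ++ [sec] else route) []
      = pvTypicalStoreOrder.filter p := by
    have := PySem.List.foldl_append_if (fun sec => d.contains sec && decide (d.getD sec [] ≠ []))
      (fun x => x) pvTypicalStoreOrder []
    simp only [List.map_id'] at this
    rw [this, List.nil_append, List.filter_congr (fun s _ => pvContains_and d s)]
  -- the typical-filter equals pvT present
  have hT0 : pvTypicalStoreOrder.filter p = pvT present := by
    refine List.filter_congr (fun t _ => ?_)
    simp only [hpres, List.mem_filter]
    by_cases hpt : p t = true
    · simp [hpt, pvNonempty_mem_keys d t (by simpa [hp, decide_eq_true_eq] using hpt)]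
    · simp [hpt]
  -- second loop of A
  have h2 := pvLoop2 p d.keys (pvTypicalStoreOrder.filter p) hknd
  have hcond : d.keys.filter (fun s => !(pvTypicalStoreOrder.filter p).contains s && p s)
      = pvE present := by
    rw [show pvE present = (d.keys.filter p).filter (fun s => decide (s ∉ pvTypicalStoreOrder)) from rfl,
        List.filter_filter]
    refine List.filter_congr (fun s _ => ?_)
    by_cases hps : p s = true
    · have : (pvTypicalStoreOrder.filter p).contains s = decide (s ∈ pvTypicalStoreOrder) := by
        simp [List.mem_filter, hps]
      simp [hps, Bool.and_comm]
    · simp [hps]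
  rw [h1]
  conv_lhs => rw [show (fun route sec => if !route.contains sec && decide (d.getD sec [] ≠ []) then route ++ [sec] else route)
      = (fun route sec => if !route.contains sec && p sec then route ++ [sec] else route) from rfl]
  rw [h2, hcond, hT0]
  -- B's side
  have hkeyfn : (fun s => (((PySem.List.enumerate pvTypicalStoreOrder).foldl (fun acc iv => acc.insert iv.2 iv.1)
      (PySem.Dict.empty : PySem.Dict String Int)).getD s (Int.ofNat pvTypicalStoreOrder.length))) = pvRank :=
    funext pvKey_eq
  rw [hkeyfn, pvSortBucket present hpnd]
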